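-- pv_equiv track=rewrite | github.com/JakaMale/p1 | Naloge/vaje7.py | najdaljse_besede
-- ===== SOURCE A (Python) =====
-- def najdaljse_besede(s):
--     s=s.split()
--
--     a=""
--     maxi_len=0
--     for i in s:
--         if len(i)>=maxi_len:
--             maxi_len=len(i)
--     for i in s:
--         if len(i)==maxi_len:
--             i +=", "
--             a += i
--
--     return a[:-2]
-- ===== SOURCE B (Python) =====
-- def najdaljse_besede(s):
--     maxi = 0
--     best = []
--     for w in s.split():
--         if len(w) > maxi:
--             maxi = len(w)
--             best = [w]
--         elif len(w) == maxi:
--             best.append(w)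
--     return ", ".join(best)
-- ===== Notes on version B (the rewrite author's own statement) =====
-- stated objective: idiomatic
-- what changed: Replaces A's two passes (find the max length, then concatenate each longest word with a trailing separator and chop the last two characters) by one pass that keeps the running max and the list of words at that length, finished with a comma-space join.
import Mathlib
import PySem

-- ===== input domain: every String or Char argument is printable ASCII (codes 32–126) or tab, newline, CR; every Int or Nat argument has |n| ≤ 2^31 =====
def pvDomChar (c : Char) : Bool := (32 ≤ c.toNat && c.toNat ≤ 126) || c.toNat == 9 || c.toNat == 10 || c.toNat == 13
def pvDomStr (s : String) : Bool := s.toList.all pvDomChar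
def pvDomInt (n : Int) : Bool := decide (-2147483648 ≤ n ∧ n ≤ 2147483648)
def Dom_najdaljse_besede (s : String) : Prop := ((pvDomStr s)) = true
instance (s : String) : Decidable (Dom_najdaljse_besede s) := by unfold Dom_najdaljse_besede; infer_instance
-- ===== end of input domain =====

-- B fuses A's two passes into one pass keeping the running max and the words at that length,
-- finished with ', '.join(best); return values agree on every input.

-- ===== PORT A =====
-- two passes: find maxi_len, then concatenate every longest word followed by ", ", then a[:-2]
def najdaljse_besede (s : String) : String :=
  let ws := PySem.Chars.split₀ s.toList
  let maxi_len := ws.foldl (fun m i => if m ≤ i.length then i.length else m) 0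
  let a := ws.foldl (fun a i => if i.length = maxi_len then a ++ (i ++ [',', ' ']) else a) []
  String.ofList (PySem.Chars.slice a none (some (-2)))

-- ===== PORT B =====
-- one pass: running max and running best-list, reset on a strictly longer word; ', '.join(best)
def najdaljse_besede_alt (s : String) : String :=
  let st := (PySem.Chars.split₀ s.toList).foldl
    (fun (st : Nat × List (List Char)) w =>
      if st.1 < w.length then (w.length, [w])
      else if w.length = st.1 then (st.1, st.2 ++ [w])
      else st)
    (0, [])
  String.ofList (PySem.Chars.join [',', ' '] st.2)

-- ===== PRECONDITION & SPEC =====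
def Spec_najdaljse_besede (s : String) (out : String) : Prop := out = najdaljse_besede_alt s
instance (s : String) (out : String) : Decidable (Spec_najdaljse_besede s out) := by unfold Spec_najdaljse_besede; infer_instance

-- ===== CLAIM (what is proved, stated in full; the proofs are below) =====
def Claim_equal_najdaljse_besede : Prop := ∀ (s : String), Dom_najdaljse_besede s → Spec_najdaljse_besede s (najdaljse_besede s)

-- ===== LEMMAS AND PROOFS =====

-- A's max loop is a fold of `max`
theorem pvMaxLoop (L : List (List Char)) : ∀ (m : Nat),
    L.foldl (fun m i => if m ≤ i.length then i.length else m) m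
      = L.foldl (fun m i => max m i.length) m := by
  induction L with
  | nil => intro m; rfl
  | cons w t ih =>
      intro m
      have h : (if m ≤ w.length then w.length else m) = max m w.length := by rw [Nat.max_def]
      simp [List.foldl_cons, h, ih]

theorem pvLeFoldMax (L : List (List Char)) : ∀ (m : Nat),
    m ≤ L.foldl (fun m i => max m i.length) m := by
  induction L with
  | nil => intro m; simp
  | cons w t ih =>
      intro m
      simpa using le_trans (Nat.le_max_left m w.length) (ih (max m w.length))

-- A's collect loop appends the filtered words, each followed by ", "
theorem pvCollectLoop (p : List Char → Prop) [DecidablePred p] (g : List Char → List Char)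
    (L : List (List Char)) : ∀ (acc : List Char),
    L.foldl (fun a i => if p i then a ++ g i else a) acc
      = acc ++ (L.filter (fun i => decide (p i))).flatMap g := by
  induction L with
  | nil => intro acc; simp
  | cons w t ih =>
      intro acc
      by_cases h : p w <;> simp [h, ih]

-- B's fold computes the overall max together with the words of exactly that length
theorem pvBFold (L : List (List Char)) : ∀ (m : Nat) (b : List (List Char)),
    L.foldl
      (fun (st : Nat × List (List Char)) w =>
        if st.1 < w.length then (w.length, [w])
        else if w.length = st.1 then (st.1, st.2 ++ [w])
        else st)
      (m, b)
    = (L.foldl (fun m i => max m i.length) m,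
       (if L.foldl (fun m i => max m i.length) m = m then b else [])
         ++ L.filter (fun w => w.length = L.foldl (fun m i => max m i.length) m)) := by
  induction L with
  | nil => intro m b; simp
  | cons w t ih =>
      intro m b
      have hle := pvLeFoldMax t
      by_cases h1 : m < w.length
      · have hmax : max m w.length = w.length := by omega
        have hW : w.length ≤ t.foldl (fun m i => max m i.length) w.length := hle w.length
        simp only [List.foldl_cons, if_pos h1, ih, hmax]
        have hne : ¬ t.foldl (fun m i => max m i.length) w.length = m := by omega
        by_cases h2 : t.foldl (fun m i => max m i.length) w.length = w.length
        · have hne2 : ¬ (w.length = m) := by omega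
          simp [h2, hne2]
        · have : ¬ (w.length = t.foldl (fun m i => max m i.length) w.length) := fun h => h2 h.symm
          simp [h2, hne, this]
      · have hmax : max m w.length = m := by omega
        have hM : m ≤ t.foldl (fun m i => max m i.length) m := hle m
        by_cases h2 : w.length = m
        · simp only [List.foldl_cons, if_neg h1, if_pos h2, ih, hmax]
          by_cases h3 : t.foldl (fun m i => max m i.length) m = m
          · simp [h3, h2]
          · have : ¬ (w.length = t.foldl (fun m i => max m i.length) m) := by omega
            simp [h3, this]
        · simp only [List.foldl_cons, if_neg h1, if_neg h2, ih, hmax]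
          have : ¬ (w.length = t.foldl (fun m i => max m i.length) m) := by omega
          simp [this]

-- flat-mapping (· ++ sep) over a nonempty list is join followed by one trailing sep
theorem pvFlatJoin (sep : List Char) (F : List (List Char)) (h : F ≠ []) :
    F.flatMap (fun w => w ++ sep) = PySem.Chars.join sep F ++ sep := by
  induction F with
  | nil => exact absurd rfl h
  | cons w t ih =>
      cases t with
      | nil => simp [PySem.Chars.join_singleton]
      | cons q r =>
          simp only [List.flatMap_cons, ih (by simp), PySem.Chars.join_cons_cons]
          simp
  
-- chopping the trailing ", " off the flat-map gives the join
theorem pvChop (F : List (List Char)) :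
    PySem.Chars.slice (F.flatMap (fun w => w ++ [',', ' '])) none (some (-2))
      = PySem.Chars.join [',', ' '] F := by
  rw [PySem.Chars.slice_eq_listSlice, PySem.List.slice_to_neg_ofNat _ 2 (by omega)]
  cases F with
  | nil => simp [PySem.Chars.join_nil]
  | cons w t =>
      rw [pvFlatJoin _ _ (by simp)]
      simp

-- ===== VERDICT (by name: the statement is the Claim_ definition above) =====
theorem najdaljse_besede_spec : Claim_equal_najdaljse_besede := by
  intro s _
  unfold Spec_najdaljse_besede najdaljse_besede najdaljse_besede_alt
  simp only [pvMaxLoop, pvBFold, pvCollectLoop, List.nil_append, ite_self]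
  rw [pvChop]
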